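-- pv_equiv track=rewrite | github.com/emircand/Aktuel-Market | text_splitter.py | process_json_content
-- ===== SOURCE A (Python) =====
-- def process_json_content(json_content, section_names):
--     # Initialize all sections with default value
--     sections = {name: "-" for name in section_names}
--
--     for item in json_content:
--         tab_name = item.get("Tab Name", "").strip().lower()
--         content = item.get("Content", "-")
--
--         # Normalize section names for matching
--         normalized_section_names = [name.strip().lower() for name in section_names]
--
--         if tab_name in normalized_section_names:
--             matched_section = section_names[normalized_section_names.index(tab_name)]
--             sections[matched_section] = content
--
--     return sections
-- ===== SOURCE B (Python) =====
-- def process_json_content(json_content, section_names):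
--     # Index items once: last item per normalized tab name wins.
--     content_by_norm = {}
--     for item in json_content:
--         content_by_norm[item.get("Tab Name", "").strip().lower()] = item.get("Content", "-")
--     sections = {name: "-" for name in section_names}
--     # Fill each section from the index; only the first section name per
--     # normalized name may be filled (matching A's .index() behaviour).
--     seen = set()
--     for name in section_names:
--         norm = name.strip().lower()
--         if norm not in seen:
--             seen.add(norm)
--             if norm in content_by_norm:
--                 sections[name] = content_by_norm[norm]
--     return sections
-- ===== Notes on version B (the rewrite author's own statement) =====
-- stated objective: faster
-- what changed: B replaces A's per-item re-normalization and scan of section_names with a single last-wins index of json_content by normalized tab name, then fills the sections in one pass over section_names guarded by a seen-set so the first section name per normalized name wins.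
import Mathlib
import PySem

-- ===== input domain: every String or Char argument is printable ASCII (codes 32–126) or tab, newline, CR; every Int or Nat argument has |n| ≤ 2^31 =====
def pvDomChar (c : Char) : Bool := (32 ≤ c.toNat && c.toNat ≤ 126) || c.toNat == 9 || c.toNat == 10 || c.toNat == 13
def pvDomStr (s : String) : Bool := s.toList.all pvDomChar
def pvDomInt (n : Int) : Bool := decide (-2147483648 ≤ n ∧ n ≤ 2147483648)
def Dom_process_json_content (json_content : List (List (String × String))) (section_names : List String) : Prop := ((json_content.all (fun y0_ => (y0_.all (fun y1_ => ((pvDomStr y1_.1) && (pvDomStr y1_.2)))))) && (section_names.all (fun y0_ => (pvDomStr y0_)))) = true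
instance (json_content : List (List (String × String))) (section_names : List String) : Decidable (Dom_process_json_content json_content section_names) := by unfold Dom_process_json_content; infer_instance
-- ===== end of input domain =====

-- B builds a last-wins index of json_content by normalized tab name once and fills the
-- sections in one pass over section_names (first section name per normalized name wins),
-- instead of A's per-item re-normalization and scan of section_names; objective: faster.

-- shared helper: name.strip().lower(), the same expression in both Pythons
def pjcNorm (s : String) : String := PySem.Str.lower (PySem.Str.strip s)

-- shared helper: sections = {name: "-" for name in section_names}, the same line in both Pythons
def pjcInit (section_names : List String) : PySem.Dict String String :=
  section_names.foldl (fun d name => d.insert name "-") PySem.Dict.empty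

-- ===== PORT A =====
-- loop body of A's 'for item in json_content'
def pjcStepA (section_names : List String) (sections : PySem.Dict String String)
    (item : List (String × String)) : PySem.Dict String String :=
  let tab_name := pjcNorm ((PySem.Dict.mk item).getD "Tab Name" "")
  let content := (PySem.Dict.mk item).getD "Content" "-"
  let normalized := section_names.map (fun name => pjcNorm name)
  if tab_name ∈ normalized then
    match PySem.List.index? normalized tab_name with
    | some i =>
      match PySem.List.pyGet? section_names (i : Int) with
      | some matched => sections.insert matched content
      | none => sections   -- unreachable: index? returns a valid index
    | none => sections     -- unreachable under the membership test
  else sections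

def process_json_content (json_content : List (List (String × String))) (section_names : List String) : List (String × String) :=
  (json_content.foldl (pjcStepA section_names) (pjcInit section_names)).items

-- ===== PORT B =====
-- content_by_norm built in one pass over json_content (last item per normalized name wins)
def pjcIndex (json_content : List (List (String × String))) : PySem.Dict String String :=
  json_content.foldl (fun m item =>
    m.insert (pjcNorm ((PySem.Dict.mk item).getD "Tab Name" ""))
             ((PySem.Dict.mk item).getD "Content" "-")) PySem.Dict.empty

-- loop body of B's 'for name in section_names'; state = (seen, sections)
def pjcStepB (content_by_norm : PySem.Dict String String)
    (st : PySem.Set String × PySem.Dict String String) (name : String) :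
    PySem.Set String × PySem.Dict String String :=
  let norm := pjcNorm name
  if st.1.contains norm then st
  else
    (PySem.Set.add st.1 norm,
     match content_by_norm.get? norm with
     | some c => st.2.insert name c
     | none => st.2)

def process_json_content_alt (json_content : List (List (String × String))) (section_names : List String) : List (String × String) :=
  (section_names.foldl (pjcStepB (pjcIndex json_content))
    (PySem.Set.empty, pjcInit section_names)).2.items

-- ===== PRECONDITION & SPEC =====
def Spec_process_json_content (json_content : List (List (String × String))) (section_names : List String) (out : List (String × String)) : Prop := out = process_json_content_alt json_content section_names
instance (json_content : List (List (String × String))) (section_names : List String) (out : List (String × String)) : Decidable (Spec_process_json_content json_content section_names out) := by unfold Spec_process_json_content; infer_instance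

-- ===== CLAIM (what is proved, stated in full; the proofs are below) =====
def Claim_equal_process_json_content : Prop := ∀ (json_content : List (List (String × String))) (section_names : List String), Dom_process_json_content json_content section_names → Spec_process_json_content json_content section_names (process_json_content json_content section_names)

-- ===== LEMMAS AND PROOFS =====

-- two inserts at distinct keys that are both already present commute
theorem pjc_insert_comm (d : PySem.Dict String String) (k k' : String) (v v' : String)
    (hk : d.contains k = true) (hk' : d.contains k' = true) (hne : k ≠ k') :
    (d.insert k v).insert k' v' = (d.insert k' v').insert k v := by
  have h1 : (d.insert k v).contains k' = true := by
    rw [PySem.Dict.contains_insert]; simp [hk']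
  have h2 : (d.insert k' v').contains k = true := by
    rw [PySem.Dict.contains_insert]; simp [hk]
  apply PySem.Dict.ext
  rw [PySem.Dict.items_insert_of_contains _ _ h1, PySem.Dict.items_insert_of_contains _ _ h2,
      PySem.Dict.items_insert_of_contains _ _ hk, PySem.Dict.items_insert_of_contains _ _ hk']
  rw [List.map_map, List.map_map]
  apply List.map_congr_left
  intro p _
  simp only [Function.comp]
  by_cases h : p.1 = k
  · simp [h, hne]
  · by_cases h' : p.1 = k' <;> simp [h, h', Ne.symm hne]

-- once a key's normalized name is already seen, inserting at it commutes out of B's pass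
theorem pjc_foldB_comm (m : PySem.Dict String String) (names : List String)
    (s : PySem.Set String) (d : PySem.Dict String String) (k v : String)
    (hs : pjcNorm k ∈ s) (hk : d.contains k = true)
    (hall : ∀ name ∈ names, d.contains name = true) :
    names.foldl (pjcStepB m) (s, d.insert k v) =
      ((names.foldl (pjcStepB m) (s, d)).1, (names.foldl (pjcStepB m) (s, d)).2.insert k v) := by
  induction names generalizing s d with
  | nil => rfl
  | cons name rest ih =>
    simp only [List.foldl_cons, pjcStepB]
    by_cases h : s.contains (pjcNorm name) = true
    · simp only [h, if_true]
      exact ih s d hs hk (fun x hx => hall x (List.mem_cons_of_mem _ hx))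
    · simp only [eq_false_of_ne_true h, if_neg Bool.false_ne_true]
      have hnek : name ≠ k := by
        intro he; exact h ((PySem.Set.contains_iff s _).2 (he ▸ hs))
      have hnamed : d.contains name = true := hall name (List.mem_cons_self ..)
      have hs' : pjcNorm k ∈ PySem.Set.add s (pjcNorm name) := (PySem.Set.mem_add _ _ _).2 (Or.inl hs)
      have hall' : ∀ x ∈ rest, d.contains x = true := fun x hx => hall x (List.mem_cons_of_mem _ hx)
      have hpres : ∀ (w : String) (x : String), d.contains x = true → (d.insert name w).contains x = true := by
        intro w x hx; rw [PySem.Dict.contains_insert]; simp [hx]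
      cases hg : m.get? (pjcNorm name)
      · exact ih _ d hs' hk hall'
      · rename_i c
        dsimp only
        rw [pjc_insert_comm d k name v c hk hnamed (Ne.symm hnek)]
        exact ih _ (d.insert name c) hs' (hpres c k hk) (fun x hx => hpres c x (hall' x hx))

-- an index update at an already-seen normalized name is invisible to the rest of the pass
theorem pjc_foldB_seen (m : PySem.Dict String String) (n c : String)
    (names : List String) (s : PySem.Set String) (d : PySem.Dict String String)
    (hs : n ∈ s) :
    names.foldl (pjcStepB (m.insert n c)) (s, d) = names.foldl (pjcStepB m) (s, d) := by
  induction names generalizing s d with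
  | nil => rfl
  | cons name rest ih =>
    simp only [List.foldl_cons, pjcStepB]
    by_cases h : s.contains (pjcNorm name) = true
    · simp only [h, if_true]; exact ih s d hs
    · have hne : pjcNorm name ≠ n := by
        intro he; exact h ((PySem.Set.contains_iff s _).2 (he ▸ hs))
      simp only [eq_false_of_ne_true h, if_neg Bool.false_ne_true]
      rw [PySem.Dict.get?_insert_of_ne _ c hne]
      cases m.get? (pjcNorm name) <;> dsimp only <;>
        exact ih _ _ ((PySem.Set.mem_add _ _ _).2 (Or.inl hs))

-- an index entry whose normalized name matches no section name is invisible to B's pass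
theorem pjc_foldB_insert_notmem (m : PySem.Dict String String) (n c : String)
    (names : List String) (s : PySem.Set String) (d : PySem.Dict String String)
    (h : n ∉ names.map pjcNorm) :
    names.foldl (pjcStepB (m.insert n c)) (s, d) = names.foldl (pjcStepB m) (s, d) := by
  induction names generalizing s d with
  | nil => rfl
  | cons name rest ih =>
    simp only [List.map_cons, List.mem_cons, not_or] at h
    simp only [List.foldl_cons, pjcStepB]
    rw [PySem.Dict.get?_insert_of_ne _ c (Ne.symm h.1)]
    by_cases hc : s.contains (pjcNorm name) = true
    · simp only [hc, if_true]; exact ih _ _ h.2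
    · simp only [eq_false_of_ne_true hc]
      cases m.get? (pjcNorm name) <;> exact ih _ _ h.2

-- updating the index at norm n = updating the first section name with norm n afterwards
set_option maxHeartbeats 1000000 in
theorem pjc_foldB_insert_mem (m : PySem.Dict String String) (n c : String)
    (pre suf : List String) (matched : String) (s : PySem.Set String)
    (d : PySem.Dict String String)
    (hm : pjcNorm matched = n) (hpre : n ∉ pre.map pjcNorm) (hns : n ∉ s)
    (hall : ∀ name ∈ pre ++ matched :: suf, d.contains name = true) :
    ((pre ++ matched :: suf).foldl (pjcStepB (m.insert n c)) (s, d)).2 =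
      (((pre ++ matched :: suf).foldl (pjcStepB m) (s, d)).2).insert matched c := by
  induction pre generalizing s d with
  | nil =>
    simp only [List.nil_append, List.foldl_cons, pjcStepB, hm]
    have hcs : s.contains n = false := by
      rw [Bool.eq_false_iff]; intro hc; exact hns ((PySem.Set.contains_iff s n).1 hc)
    simp only [hcs, if_neg Bool.false_ne_true]
    rw [PySem.Dict.get?_insert_self]
    dsimp only
    have hmatched : d.contains matched = true := hall matched (List.mem_cons_self ..)
    have hsn : pjcNorm matched ∈ PySem.Set.add s n := by
      rw [hm]; exact (PySem.Set.mem_add _ _ _).2 (Or.inr rfl)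
    have hallsuf : ∀ x ∈ suf, d.contains x = true := fun x hx =>
      hall x (by simp [hx])
    rw [pjc_foldB_seen m n c suf _ _ ((PySem.Set.mem_add _ _ _).2 (Or.inr rfl))]
    cases hg : m.get? n
    · rw [pjc_foldB_comm m suf (PySem.Set.add s n) d matched c hsn hmatched hallsuf]
    · rename_i w
      dsimp only
      rw [pjc_foldB_comm m suf (PySem.Set.add s n) d matched c hsn hmatched hallsuf,
          pjc_foldB_comm m suf (PySem.Set.add s n) d matched w hsn hmatched hallsuf,
          PySem.Dict.insert_insert_self]
  | cons p pre' ih =>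
    simp only [List.map_cons, List.mem_cons, not_or] at hpre
    have hallrest : ∀ x ∈ pre' ++ matched :: suf, d.contains x = true := fun x hx =>
      hall x (List.mem_cons_of_mem _ hx)
    have hpres : ∀ (w x : String), d.contains x = true → (d.insert p w).contains x = true := by
      intro w x hx; rw [PySem.Dict.contains_insert]; simp [hx]
    have hns' : n ∉ PySem.Set.add s (pjcNorm p) := by
      rw [PySem.Set.mem_add]; rintro (h1 | h2)
      · exact hns h1
      · exact hpre.1 h2
    have hstep : pjcStepB (m.insert n c) (s, d) p = pjcStepB m (s, d) p := by
      simp only [pjcStepB]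
      rw [PySem.Dict.get?_insert_of_ne _ c (Ne.symm hpre.1)]
    simp only [List.cons_append, List.foldl_cons, hstep]
    by_cases h : s.contains (pjcNorm p) = true
    · have hmem : pjcNorm p ∈ s := (PySem.Set.contains_iff s _).1 h
      have h2 : pjcStepB m (s, d) p = (s, d) := by simp [pjcStepB, hmem]
      rw [h2]; exact ih _ _ hpre.2 hns hallrest
    · have hnm : pjcNorm p ∉ s := fun hx => h ((PySem.Set.contains_iff s _).2 hx)
      cases hg : m.get? (pjcNorm p)
      · have h2 : pjcStepB m (s, d) p = (PySem.Set.add s (pjcNorm p), d) := by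
          simp [pjcStepB, hg, hnm]
        rw [h2]; exact ih _ _ hpre.2 hns' hallrest
      · rename_i w
        have h2 : pjcStepB m (s, d) p = (PySem.Set.add s (pjcNorm p), d.insert p w) := by
          simp [pjcStepB, hg, hnm]
        rw [h2]; exact ih _ _ hpre.2 hns' (fun x hx => hpres w x (hallrest x hx))

-- B's pass over the empty index changes nothing
theorem pjc_foldB_empty (names : List String) (s : PySem.Set String)
    (d : PySem.Dict String String) :
    (names.foldl (pjcStepB (PySem.Dict.empty : PySem.Dict String String)) (s, d)).2 = d := by
  induction names generalizing s d with
  | nil => rfl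
  | cons name rest ih =>
    simp only [List.foldl_cons, pjcStepB, PySem.Dict.get?_empty]
    by_cases h : s.contains (pjcNorm name) = true
    · simp only [h, if_true]; exact ih s d
    · simp only [eq_false_of_ne_true h]; exact ih _ d

-- every section name is a key of the initial sections dict
theorem pjc_init_contains (section_names : List String) (name : String)
    (h : name ∈ section_names) : (pjcInit section_names).contains name = true := by
  rw [PySem.Dict.contains_iff_mem_keys]
  unfold pjcInit
  rw [show (fun (d : PySem.Dict String String) name => d.insert name "-") = (fun d x => d.insert x ((fun (_ : PySem.Dict String String) (_ : String) => "-") d x)) from rfl]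
  rw [PySem.Dict.keys_foldl_insert]
  rw [show (PySem.Dict.empty : PySem.Dict String String).keys = PySem.Set.empty from rfl]
  rw [PySem.Set.update_empty]
  exact (PySem.Set.mem_ofList _ _).2 h

-- A's membership-and-index step finds the first section name with the given norm
theorem pjc_decompose (section_names : List String) (n : String)
    (h : n ∈ section_names.map pjcNorm) :
    ∃ pre matched suf i,
      section_names = pre ++ matched :: suf ∧ pjcNorm matched = n ∧ n ∉ pre.map pjcNorm ∧
      PySem.List.index? (section_names.map pjcNorm) n = some i ∧
      PySem.List.pyGet? section_names (i : Int) = some matched := by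
  cases hidx : PySem.List.index? (section_names.map pjcNorm) n with
  | none => exact absurd ((PySem.List.index?_eq_none_iff _ _).1 hidx) (by simpa using h)
  | some i =>
    obtain ⟨preM, sufM, heq, hlen, hnpre⟩ := (PySem.List.index?_eq_some_iff _ _ _).1 hidx
    rw [List.map_eq_append_iff] at heq
    obtain ⟨pre, rest, hsn, hpre, hrest⟩ := heq
    rw [List.map_eq_cons_iff] at hrest
    obtain ⟨matched, suf, hrest', hmn, hsuf⟩ := hrest
    refine ⟨pre, matched, suf, i, by rw [hsn, hrest'], hmn, ?_, rfl, ?_⟩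
    · rw [hpre]; exact hnpre
    · have hplen : pre.length = i := by rw [← hlen, ← hpre, List.length_map]
      rw [PySem.List.pyGet?_natCast]
      rw [hsn, hrest', ← hplen]
      simp

-- folding one more item with A's step = folding that item into B's index
theorem pjc_main (section_names : List String) (json_content : List (List (String × String)))
    (m : PySem.Dict String String) :
    json_content.foldl (pjcStepA section_names)
        ((section_names.foldl (pjcStepB m) (PySem.Set.empty, pjcInit section_names)).2) =
      (section_names.foldl
        (pjcStepB (json_content.foldl (fun m item =>
          m.insert (pjcNorm ((PySem.Dict.mk item).getD "Tab Name" ""))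
                   ((PySem.Dict.mk item).getD "Content" "-")) m))
        (PySem.Set.empty, pjcInit section_names)).2 := by
  induction json_content generalizing m with
  | nil => rfl
  | cons item rest ih =>
    simp only [List.foldl_cons]
    set n := pjcNorm ((PySem.Dict.mk item).getD "Tab Name" "") with hn
    set c := (PySem.Dict.mk item).getD "Content" "-" with hc
    have hstep : pjcStepA section_names
        ((section_names.foldl (pjcStepB m) (PySem.Set.empty, pjcInit section_names)).2) item =
        (section_names.foldl (pjcStepB (m.insert n c)) (PySem.Set.empty, pjcInit section_names)).2 := by
      by_cases hmem : n ∈ section_names.map pjcNorm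
      · obtain ⟨pre, matched, suf, i, hsn, hmn, hpre, hidx, hget⟩ :=
          pjc_decompose section_names n hmem
        have hall : ∀ name ∈ pre ++ matched :: suf,
            (pjcInit section_names).contains name = true := by
          intro x hx; exact pjc_init_contains _ _ (hsn ▸ hx)
        have hres := pjc_foldB_insert_mem m n c pre suf matched PySem.Set.empty
          (pjcInit section_names) hmn hpre (by simp [PySem.Set.empty]) hall
        simp only [pjcStepA]
        rw [if_pos hmem, hidx]
        dsimp only
        rw [hget]
        dsimp only
        rw [← hsn] at hres
        rw [hres]
      · simp only [pjcStepA]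
        rw [if_neg hmem, pjc_foldB_insert_notmem m n c _ _ _ hmem]
    rw [hstep, ih (m.insert n c)]

-- ===== VERDICT (by name: the statement is the Claim_ definition above) =====
theorem process_json_content_spec : Claim_equal_process_json_content := by
  intro json_content section_names _
  show _ = _
  unfold process_json_content process_json_content_alt pjcIndex
  rw [← pjc_main section_names json_content PySem.Dict.empty]
  rw [pjc_foldB_empty]
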